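-- pv_equiv track=rewrite | github.com/xl666/recursosEstructuras24 | parcial2/estudiantes/Amacalli/Parcial2_SEC/infoUsuario2.py | crear_subdic
-- ===== SOURCE A (Python) =====
-- def crear_subdic(infos):
--     valor = []
--     llaves = ['algoritmo', 'salt', 'password']
--     lista = []
--
--     for i in range(len(infos)):
--         for j in range(len(infos[i])):
--             if j % 2 != 0:
--                 valor.append(infos[i][j].split('$'))
--
--     for i in range(len(valor)):
--         subdic = {}
--         for j in range(1, len(valor[i])):
--             subdic[llaves[j - 1]] = valor[i][j]
--         lista.append(subdic)
--
--     return lista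
-- ===== SOURCE B (Python) =====
-- def _armar(partes):
--     # consume the key list in parallel with the tail parts
--     subdic = {}
--     pendientes = ['algoritmo', 'salt', 'password']
--     for p in partes[1:]:
--         subdic[pendientes[0]] = p
--         pendientes = pendientes[1:]
--     return subdic
--
--
-- def _fila_dicts(fila):
--     # recursive two-at-a-time walk: skip the even element, take the odd one
--     if len(fila) < 2:
--         return []
--     return [_armar(fila[1].split('$'))] + _fila_dicts(fila[2:])
--
--
-- def crear_subdic(infos):
--     lista = []
--     for fila in infos:
--         lista.extend(_fila_dicts(fila))
--     return lista
-- ===== Notes on version B (the rewrite author's own statement) =====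
-- stated objective: simpler
-- what changed: Replaces A's two staged index-loop passes (building an intermediate 'valor' list of all splits, then a second range-loop rebuilding each dict via positional llaves[j-1] lookups) with a recursive two-at-a-time walk over each row that builds each subdict immediately by consuming the key list in parallel with the tail parts; no index arithmetic, no modulo test, no intermediate list.
import Mathlib
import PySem

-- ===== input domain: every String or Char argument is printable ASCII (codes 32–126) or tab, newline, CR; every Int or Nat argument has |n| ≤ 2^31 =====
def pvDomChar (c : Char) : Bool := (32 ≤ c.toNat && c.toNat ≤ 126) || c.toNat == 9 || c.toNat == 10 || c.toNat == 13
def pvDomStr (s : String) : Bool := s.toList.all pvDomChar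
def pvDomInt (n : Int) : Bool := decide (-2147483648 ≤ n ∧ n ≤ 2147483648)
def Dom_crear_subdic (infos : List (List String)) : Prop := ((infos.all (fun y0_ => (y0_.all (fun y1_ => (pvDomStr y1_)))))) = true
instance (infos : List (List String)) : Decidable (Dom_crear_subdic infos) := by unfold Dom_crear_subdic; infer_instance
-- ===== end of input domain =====

-- B replaces A's two staged index-loop passes (intermediate 'valor' list, then positional
-- llaves[j-1] lookups) by a recursive two-at-a-time walk over each row that builds each
-- subdict immediately by consuming the key list in parallel; objective: simpler. Same
-- return value on Pre_.

-- ===== PORT A =====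
def crear_subdic (infos : List (List String)) : List (List (String × String)) :=
  let llaves : List String := ["algoritmo", "salt", "password"]
  let valor : List (List String) :=
    (PySem.List.pyRange 0 (PySem.List.len infos) 1).foldl (fun valor i =>
      (PySem.List.pyRange 0 (PySem.List.len (PySem.List.pyGetD infos i [])) 1).foldl (fun valor j =>
        if PySem.Int.mod j 2 ≠ 0 then
          valor ++ [(PySem.Str.split? (PySem.List.pyGetD (PySem.List.pyGetD infos i []) j "") "$").getD []]
        else valor) valor) []
  (PySem.List.pyRange 0 (PySem.List.len valor) 1).foldl (fun lista i =>
    let vi := PySem.List.pyGetD valor i []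
    let subdic := (PySem.List.pyRange 1 (PySem.List.len vi) 1).foldl
      (fun d j => d.insert (PySem.List.pyGetD llaves (j - 1) "") (PySem.List.pyGetD vi j ""))
      (PySem.Dict.empty)
    lista ++ [subdic.items]) []

-- ===== PORT B =====
-- _armar: consume the key list in parallel with the tail parts
def pvArmar (partes : List String) : PySem.Dict String String :=
  ((PySem.List.slice partes (some 1) none).foldl
    (fun (st : PySem.Dict String String × List String) p =>
      (st.1.insert (PySem.List.pyGetD st.2 0 "") p, PySem.List.slice st.2 (some 1) none))
    (PySem.Dict.empty, ["algoritmo", "salt", "password"])).1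

-- _fila_dicts: recursive two-at-a-time walk, skip the even element, take the odd one
def pvFilaDicts (fila : List String) : List (List (String × String)) :=
  match fila with
  | _ :: x :: rest => (pvArmar ((PySem.Str.split? x "$").getD [])).items :: pvFilaDicts rest
  | _ => []

def crear_subdic_alt (infos : List (List String)) : List (List (String × String)) :=
  infos.foldl (fun lista fila => lista ++ pvFilaDicts fila) []

-- ===== PRECONDITION & SPEC =====
-- Pre_ excludes exactly the inputs on which A raises IndexError: an odd-indexed field
-- splitting on '$' into five or more parts makes A evaluate llaves[j-1] with j-1 ≥ 3.
def Pre_crear_subdic (infos : List (List String)) : Prop :=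
  ∀ fila ∈ infos, ∀ p ∈ PySem.List.enumerate fila 0,
    PySem.Int.mod p.1 2 = 1 → ((PySem.Str.split? p.2 "$").getD []).length ≤ 4
instance (infos : List (List String)) : Decidable (Pre_crear_subdic infos) := by
  unfold Pre_crear_subdic; infer_instance
def pvWitness_crear_subdic : List (List String) := [["ana", "$5$ab$h1"], ["z"]]

def Spec_crear_subdic (infos : List (List String)) (out : List (List (String × String))) : Prop :=
  out = crear_subdic_alt infos
instance (infos : List (List String)) (out : List (List (String × String))) : Decidable (Spec_crear_subdic infos out) := by unfold Spec_crear_subdic; infer_instance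

-- ===== CLAIM (what is proved, stated in full; the proofs are below) =====
def Claim_equal_crear_subdic : Prop := ∀ (infos : List (List String)), Dom_crear_subdic infos → Pre_crear_subdic infos → Spec_crear_subdic infos (crear_subdic infos)

-- ===== LEMMAS AND PROOFS =====

-- A's inner dict-building loop, packaged for the proofs.
def pvItemsA (parts : List String) : List (String × String) :=
  ((PySem.List.pyRange 1 (PySem.List.len parts) 1).foldl
    (fun d j => d.insert
      (PySem.List.pyGetD (["algoritmo", "salt", "password"] : List String) (j - 1) "")
      (PySem.List.pyGetD parts j ""))
    (PySem.Dict.empty)).items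

-- A foldl that conditionally appends one element is a map over the filtered list.
theorem pv_foldl_append_ite {α β : Type} (P : α → Prop) [DecidablePred P] (f : α → β)
    (l : List α) (acc : List β) :
    l.foldl (fun acc x => if P x then acc ++ [f x] else acc) acc
      = acc ++ (l.filter (fun x => decide (P x))).map f := by
  induction l generalizing acc with
  | nil => simp
  | cons x xs ih =>
    by_cases h : P x <;> simp [List.foldl_cons, h, ih]

-- Python's j % 2 is 0 or 1, so 'j % 2 != 0' is 'j % 2 == 1'.
theorem pv_mod_two_ne_zero (j : Int) :
    (decide (PySem.Int.mod j 2 ≠ 0)) = (PySem.Int.mod j 2 == 1) := by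
  have h : PySem.Int.mod j 2 = j % 2 := by simp [PySem.Int.mod, Int.fmod_eq_emod]
  rw [h]
  have h0 : j % 2 = 0 ∨ j % 2 = 1 := by omega
  rcases h0 with h2 | h2 <;> simp [h2]

-- A's positional insert loop and B's key-consuming fold build the same items
-- whenever parts has at most 4 elements.
theorem pv_dict_eq (parts : List String) (h : parts.length ≤ 4) :
    pvItemsA parts = (pvArmar parts).items := by
  match parts with
  | [] => simp only [pvItemsA, pvArmar]; rw [PySem.List.pyRange_one]; rfl
  | [a] => simp only [pvItemsA, pvArmar]; rw [PySem.List.pyRange_one]; rfl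
  | [a, b] => simp only [pvItemsA, pvArmar]; rw [PySem.List.pyRange_one]; rfl
  | [a, b, c] => simp only [pvItemsA, pvArmar]; rw [PySem.List.pyRange_one]; rfl
  | [a, b, c, d] => simp only [pvItemsA, pvArmar]; rw [PySem.List.pyRange_one]; rfl
  | a :: b :: c :: d :: e :: rest => simp at h; omega

-- flatMap of singletons is a map.
theorem pv_flatMap_single {α β : Type} (f : α → β) (l : List α) :
    l.flatMap (fun x => [f x]) = l.map f := by
  induction l with
  | nil => rfl
  | cons x xs ih => simp [ih]

-- flatMap congruence on members.
theorem pv_flatMap_congr {α β : Type} {f g : α → List β} {l : List α}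
    (h : ∀ x ∈ l, f x = g x) : l.flatMap f = l.flatMap g := by
  induction l with
  | nil => rfl
  | cons x xs ih =>
    simp only [List.flatMap_cons]
    rw [h x (List.mem_cons_self), ih (fun y hy => h y (List.mem_cons_of_mem x hy))]

-- Shifting the start of enumerate only shifts the indices.
theorem pv_enum_shift {α : Type} (xs : List α) (s t : Int) :
    PySem.List.enumerate xs s
      = (PySem.List.enumerate xs t).map (fun p => (p.1 + (s - t), p.2)) := by
  induction xs generalizing s t with
  | nil => simp [PySem.List.enumerate_nil]
  | cons x xs ih =>
    simp only [PySem.List.enumerate_cons, List.map_cons]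
    have h1 : t + (s - t) = s := by omega
    have h2 : s + 1 - (t + 1) = s - t := by omega
    rw [h1, ih (s + 1) (t + 1), h2]

-- The per-row equality: A's filtered-enumerate pass equals B's two-at-a-time recursion.
theorem pv_row (fila : List String)
    (H : ∀ p ∈ PySem.List.enumerate fila 0, PySem.Int.mod p.1 2 = 1 →
          ((PySem.Str.split? p.2 "$").getD []).length ≤ 4) :
    ((PySem.List.enumerate fila 0).filter (fun p => PySem.Int.mod p.1 2 == 1)).map
        (fun p => pvItemsA ((PySem.Str.split? p.2 "$").getD []))
      = pvFilaDicts fila := by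
  match fila with
  | [] => rfl
  | [x] =>
    simp only [PySem.List.enumerate_cons, PySem.List.enumerate_nil, List.filter_cons,
      List.filter_nil, PySem.Int.mod, Int.fmod_eq_emod]
    norm_num [pvFilaDicts]
  | a :: x :: rest =>
    have henum : PySem.List.enumerate (a :: x :: rest) 0
        = (0, a) :: (1, x) :: PySem.List.enumerate rest 2 := by
      simp [PySem.List.enumerate_cons]
    rw [henum]
    have hx : ((PySem.Str.split? x "$").getD []).length ≤ 4 := by
      refine H (1, x) ?_ (show PySem.Int.mod 1 2 = 1 by decide)
      rw [henum]; simp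
    have hshift : ((PySem.List.enumerate rest 2).filter
          (fun p => PySem.Int.mod p.1 2 == 1)).map
            (fun p => pvItemsA ((PySem.Str.split? p.2 "$").getD []))
        = ((PySem.List.enumerate rest 0).filter
          (fun p => PySem.Int.mod p.1 2 == 1)).map
            (fun p => pvItemsA ((PySem.Str.split? p.2 "$").getD [])) := by
      rw [pv_enum_shift rest 2 0, List.filter_map, List.map_map]
      congr 1
      · congr 1
        funext p
        simp only [Function.comp_def]
        have : PySem.Int.mod (p.1 + (2 - 0)) 2 = PySem.Int.mod p.1 2 := by
          simp only [PySem.Int.mod, Int.fmod_eq_emod]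
          omega
        simp only [this]
    have hrest : ∀ p ∈ PySem.List.enumerate rest 0, PySem.Int.mod p.1 2 = 1 →
        ((PySem.Str.split? p.2 "$").getD []).length ≤ 4 := by
      intro p hp hodd
      have hp2 : (p.1 + 2, p.2) ∈ PySem.List.enumerate rest 2 := by
        rw [pv_enum_shift rest 2 0]
        refine List.mem_map.mpr ⟨p, hp, ?_⟩
        simp
      have hodd2 : PySem.Int.mod (p.1 + 2) 2 = 1 := by
        simp only [PySem.Int.mod, Int.fmod_eq_emod] at hodd ⊢
        omega
      exact H (p.1 + 2, p.2) (by rw [henum]; simp [hp2]) hodd2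
    have c0 : (PySem.Int.mod (0 : Int) 2 == 1) = false := rfl
    have c1 : (PySem.Int.mod (1 : Int) 2 == 1) = true := rfl
    simp only [List.filter_cons, c0, c1, Bool.false_eq_true, if_false, if_true, List.map_cons]
    rw [hshift, pv_row rest hrest]
    simp only [pvFilaDicts, pv_dict_eq _ hx]

theorem crear_subdic_eq (infos : List (List String)) (hpre : Pre_crear_subdic infos) :
    crear_subdic infos = crear_subdic_alt infos := by
  have hinner : ∀ (fila : List String) (acc : List (List String)),
      (PySem.List.pyRange 0 (PySem.List.len fila) 1).foldl
        (fun v j => if PySem.Int.mod j 2 ≠ 0 then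
            v ++ [(PySem.Str.split? (PySem.List.pyGetD fila j "") "$").getD []] else v) acc
      = acc ++ ((PySem.List.pyRange 0 (PySem.List.len fila) 1).filter
            (fun j => PySem.Int.mod j 2 == 1)).map
          (fun j => (PySem.Str.split? (PySem.List.pyGetD fila j "") "$").getD []) := by
    intro fila acc
    rw [pv_foldl_append_ite (fun j => PySem.Int.mod j 2 ≠ 0)
        (fun j => (PySem.Str.split? (PySem.List.pyGetD fila j "") "$").getD []) _ acc]
    rw [show (fun j => decide (PySem.Int.mod j 2 ≠ 0)) = (fun j : Int => PySem.Int.mod j 2 == 1)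
        from funext pv_mod_two_ne_zero]
  simp only [crear_subdic, crear_subdic_alt]
  -- A's first pass: outer index loop → fold over the rows themselves
  rw [PySem.List.foldl_pyRange_zero_pyGetD infos ([] : List String)
      (fun acc fila =>
        (PySem.List.pyRange 0 (PySem.List.len fila) 1).foldl
          (fun v j => if PySem.Int.mod j 2 ≠ 0 then
              v ++ [(PySem.Str.split? (PySem.List.pyGetD fila j "") "$").getD []] else v) acc)
      ([] : List (List String))]
  simp only [hinner]
  -- A's second pass: index loop → fold over valor itself
  rw [PySem.List.foldl_pyRange_zero_pyGetD _ ([] : List String)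
      (fun acc vi => acc ++
        [((PySem.List.pyRange 1 (PySem.List.len vi) 1).foldl
            (fun d j => d.insert
              (PySem.List.pyGetD (["algoritmo", "salt", "password"] : List String) (j - 1) "")
              (PySem.List.pyGetD vi j ""))
            (PySem.Dict.empty)).items])
      ([] : List (List (String × String)))]
  rw [PySem.List.foldl_append_eq_flatMap, PySem.List.foldl_append_eq_flatMap]
  simp only [List.nil_append]
  rw [pv_flatMap_single, List.map_flatMap]
  -- B is a flatMap of the per-row recursion
  rw [PySem.List.foldl_append_eq_flatMap]
  simp only [List.nil_append]
  -- row by row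
  refine pv_flatMap_congr ?_
  intro fila hfila
  have Hfila := hpre fila hfila
  rw [← pv_row fila Hfila]
  rw [PySem.List.enumerate_eq_map_pyRange fila "", List.filter_map, List.map_map, List.map_map]
  simp only [Function.comp_def, pvItemsA]

-- ===== VERDICT (by name: the statement is the Claim_ definition above) =====
theorem crear_subdic_spec : Claim_equal_crear_subdic := by
  intro infos _ hpre
  exact crear_subdic_eq infos hpre
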